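-- pv_equiv track=rewrite | github.com/zeyu-chen/25t1-comp9021-labs | Lab 1/Solutions/ex_2_sol.py | f2_4
-- ===== SOURCE A (Python) =====
-- def f2_4(n: int) -> str:
--     """
--     Creates a pattern where each of the n lines contains n repetitions of the digit n.
--     Uses nested loops for explicit row and column construction.
--     """
--     if n == 0:
--         return ""
--
--     result = ""
--     for _ in range(n):
--         row = ""
--         for _ in range(n):
--             row += str(n)
--         result += row + "\n"
--     return result
-- ===== SOURCE B (Python) =====
-- def f2_4(n: int) -> str:
--     # Closed form: one row is str(n) repeated n times; repeat the whole line n times.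
--     return (str(n) * n + "\n") * n
-- ===== Notes on version B (the rewrite author's own statement) =====
-- stated objective: simpler
-- what changed: Replaces the nested character-appending loops by a single closed-form string-multiplication expression that builds one row and repeats it, with no iteration and no special-case guard.
import Mathlib
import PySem

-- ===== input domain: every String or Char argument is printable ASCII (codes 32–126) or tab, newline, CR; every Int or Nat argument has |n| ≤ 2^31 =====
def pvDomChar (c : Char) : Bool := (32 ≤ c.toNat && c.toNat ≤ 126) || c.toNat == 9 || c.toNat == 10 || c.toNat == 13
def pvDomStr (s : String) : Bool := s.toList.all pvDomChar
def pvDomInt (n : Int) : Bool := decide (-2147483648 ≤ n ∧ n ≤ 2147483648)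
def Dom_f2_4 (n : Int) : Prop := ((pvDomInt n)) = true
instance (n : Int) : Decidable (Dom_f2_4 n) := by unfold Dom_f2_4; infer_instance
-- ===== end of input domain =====

-- B replaces A's nested loops by the closed-form string multiplication (str(n)*n + "\n")*n (simpler).


-- ===== PORT A =====
def f2_4 (n : Int) : String :=
  if n = 0 then "" else
    String.mk ((PySem.List.pyRange 0 n 1).foldl
      (fun result _ =>
        result ++ ((PySem.List.pyRange 0 n 1).foldl (fun row _ => row ++ PySem.Int.toChars n) []) ++ ['\n'])
      [])

-- ===== PORT B =====
def f2_4_alt (n : Int) : String :=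
  String.mk (PySem.List.pyRepeat (PySem.List.pyRepeat (PySem.Int.toChars n) n ++ ['\n']) n)

-- ===== PRECONDITION & SPEC =====
def Spec_f2_4 (n : Int) (out : String) : Prop := out = f2_4_alt n
instance (n : Int) (out : String) : Decidable (Spec_f2_4 n out) := by unfold Spec_f2_4; infer_instance

-- ===== CLAIM (what is proved, stated in full; the proofs are below) =====
def Claim_equal_f2_4 : Prop := ∀ (n : Int), Dom_f2_4 n → Spec_f2_4 n (f2_4 n)

-- ===== LEMMAS AND PROOFS =====

-- A foldl that appends a constant chunk per iteration yields init ++ flattened replicate.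
theorem foldl_append_const {α β : Type} (l : List β) (c init : List α) :
    l.foldl (fun acc _ => acc ++ c) init = init ++ (List.replicate l.length c).flatten := by
  induction l generalizing init with
  | nil => simp
  | cons x t ih => simp [List.replicate_succ, ih, List.append_assoc]

-- Same, with the chunk written as two appends (A's outer loop shape).
theorem foldl_append_const2 {α β : Type} (l : List β) (c d init : List α) :
    l.foldl (fun acc _ => acc ++ c ++ d) init = init ++ (List.replicate l.length (c ++ d)).flatten := by
  simp [List.append_assoc]

-- ===== VERDICT (by name: the statement is the Claim_ definition above) =====
theorem f2_4_spec : Claim_equal_f2_4 := by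
  intro n _
  unfold Spec_f2_4 f2_4 f2_4_alt
  split
  · rename_i h
    subst h
    rfl
  · rw [foldl_append_const2, foldl_append_const]
    simp [PySem.List.pyRepeat, PySem.List.length_pyRange_one]
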